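-- pv_equiv track=rewrite | github.com/luxonis/depthai-calibration | calibration_utils.py | get_quadrant_coordinates
-- ===== SOURCE A (Python) =====
-- def get_quadrant_coordinates(width, height, nx, ny):
--     quadrant_width = width // nx
--     quadrant_height = height // ny
--     quadrant_coords = []
--
--     for i in range(int(nx)):
--         for j in range(int(ny)):
--             left = i * quadrant_width
--             upper = j * quadrant_height
--             right = left + quadrant_width
--             bottom = upper + quadrant_height
--             quadrant_coords.append((left, upper, right, bottom))
--
--     return quadrant_coords
-- ===== SOURCE B (Python) =====
-- def get_quadrant_coordinates(width, height, nx, ny):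
--     qw = width // nx
--     qh = height // ny
--     n, m = int(nx), int(ny)
--     if n <= 0:
--         return []
--     # tiles of the first column (i = 0); every other column is a translate of it
--     block0 = [(0, j * qh, qw, j * qh + qh) for j in range(m)]
--     coords = list(block0)
--     for i in range(1, n):
--         shift = i * qw
--         coords.extend((l + shift, u, r + shift, b) for (l, u, r, b) in block0)
--     return coords
-- ===== Notes on version B (the rewrite author's own statement) =====
-- stated objective: alternative
-- what changed: Builds only the first column of tiles explicitly, then generates each remaining column by translating those already-built tiles horizontally by i*quadrant_width, instead of recomputing all four coordinates from (i, j) inside a doubly nested loop.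
import Mathlib
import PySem

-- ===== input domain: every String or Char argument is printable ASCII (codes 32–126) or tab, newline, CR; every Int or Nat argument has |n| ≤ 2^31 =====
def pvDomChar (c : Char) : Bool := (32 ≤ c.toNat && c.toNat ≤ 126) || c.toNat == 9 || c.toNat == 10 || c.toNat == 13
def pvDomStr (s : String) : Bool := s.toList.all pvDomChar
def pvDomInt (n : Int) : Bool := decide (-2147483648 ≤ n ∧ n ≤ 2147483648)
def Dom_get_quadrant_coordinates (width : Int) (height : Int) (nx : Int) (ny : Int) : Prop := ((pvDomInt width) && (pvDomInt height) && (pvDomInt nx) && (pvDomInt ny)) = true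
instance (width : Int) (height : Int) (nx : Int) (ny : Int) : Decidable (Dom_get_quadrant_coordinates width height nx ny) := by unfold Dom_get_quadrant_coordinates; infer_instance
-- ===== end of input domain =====

-- B builds only the first column of tiles and derives each remaining column by translating
-- those tiles horizontally by i*quadrant_width (objective: alternative decomposition, same cost).

-- ===== PORT A =====
def get_quadrant_coordinates (width : Int) (height : Int) (nx : Int) (ny : Int) : List (Int × Int × Int × Int) :=
  let quadrant_width := PySem.Int.floordiv width nx
  let quadrant_height := PySem.Int.floordiv height ny
  (PySem.List.pyRange 0 nx 1).foldl (fun acc i =>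
    (PySem.List.pyRange 0 ny 1).foldl (fun acc j =>
      let left := i * quadrant_width
      let upper := j * quadrant_height
      let right := left + quadrant_width
      let bottom := upper + quadrant_height
      acc ++ [(left, upper, right, bottom)]) acc) []

-- ===== PORT B =====
def get_quadrant_coordinates_alt (width : Int) (height : Int) (nx : Int) (ny : Int) : List (Int × Int × Int × Int) :=
  let qw := PySem.Int.floordiv width nx
  let qh := PySem.Int.floordiv height ny
  let n := nx   -- int(nx): identity on Int inputs
  let m := ny
  if n ≤ 0 then []
  else
    let block0 := (PySem.List.pyRange 0 m 1).map (fun j => ((0 : Int), j * qh, qw, j * qh + qh))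
    (PySem.List.pyRange 1 n 1).foldl (fun coords i =>
      let shift := i * qw
      coords ++ block0.map (fun t => (t.1 + shift, t.2.1, t.2.2.1 + shift, t.2.2.2))) block0

-- ===== PRECONDITION & SPEC =====
-- Pre_ excludes exactly nx = 0 or ny = 0, where Python A raises ZeroDivisionError on '//'.
def Pre_get_quadrant_coordinates (width : Int) (height : Int) (nx : Int) (ny : Int) : Prop := nx ≠ 0 ∧ ny ≠ 0
instance (width : Int) (height : Int) (nx : Int) (ny : Int) : Decidable (Pre_get_quadrant_coordinates width height nx ny) := by unfold Pre_get_quadrant_coordinates; infer_instance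
def pvWitness_get_quadrant_coordinates : Int × Int × Int × Int := (12, 9, 3, 3)

def Spec_get_quadrant_coordinates (width : Int) (height : Int) (nx : Int) (ny : Int) (out : List (Int × Int × Int × Int)) : Prop := out = get_quadrant_coordinates_alt width height nx ny
instance (width : Int) (height : Int) (nx : Int) (ny : Int) (out : List (Int × Int × Int × Int)) : Decidable (Spec_get_quadrant_coordinates width height nx ny out) := by unfold Spec_get_quadrant_coordinates; infer_instance

-- ===== CLAIM =====
def Claim_equal_get_quadrant_coordinates : Prop := ∀ (width : Int) (height : Int) (nx : Int) (ny : Int), Dom_get_quadrant_coordinates width height nx ny → Pre_get_quadrant_coordinates width height nx ny → Spec_get_quadrant_coordinates width height nx ny (get_quadrant_coordinates width height nx ny)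

-- ===== LEMMAS AND PROOFS =====

-- ===== VERDICT =====
theorem get_quadrant_coordinates_spec : Claim_equal_get_quadrant_coordinates := by
  intro width height nx ny _ _
  unfold Spec_get_quadrant_coordinates get_quadrant_coordinates get_quadrant_coordinates_alt
  simp only [PySem.List.foldl_append_singleton_eq_map, PySem.List.foldl_append_eq_flatMap,
    List.nil_append]
  by_cases h : nx ≤ 0
  · rw [if_pos h, PySem.List.pyRange_one_eq_nil (by omega : nx ≤ 0)]; rfl
  · rw [if_neg h, PySem.List.pyRange_one_cons (by omega : (0:Int) < nx)]
    simp only [List.flatMap_cons, List.map_map, Function.comp_def]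
    congr 1
    · apply List.map_congr_left; intro j _; simp
    · apply List.flatMap_congr
      intro i _
      apply List.map_congr_left
      intro j _
      simp [add_comm]
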